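-- pv_equiv track=rewrite | github.com/Jo-Chang/TIL | kdt2_TIL/week07/day5/Algorithm-Test-04/2200102/1208-Flatten.py | get_diff_max_min
-- ===== SOURCE A (Python) =====
-- def get_diff_max_min(lst_: list, dump: int):
--     '''
--     Description:
--         Calculate dump moving maximum height to minimum height
--     Arguments:
--         lst_`list` : list of box heights
--         dump`int` : dump numbers
--     Returns:
--         `int` : difference between maximum and minimum
--     '''
--     for i in range(dump):
--         max_idx = lst_.index(max(lst_))
--         min_idx = lst_.index(min(lst_))
--
--         ans = lst_[max_idx] - lst_[min_idx]
--         if ans <= 1: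
--             break
--
--         lst_[max_idx] -= 1
--         lst_[min_idx] += 1
--     else:
--         ans = max(lst_) - min(lst_)
--
--     return ans
-- ===== SOURCE B (Python) =====
-- def get_diff_max_min(lst_: list, dump: int):
--     # Bulk version: count heights once, move whole top/bottom groups per round
--     # (note: unlike A, does not mutate lst_ in place; return value identical).
--     cnt = {}
--     for h in lst_:
--         cnt[h] = cnt.get(h, 0) + 1
--     remaining = dump
--     while remaining > 0:
--         hi = max(cnt)
--         lo = min(cnt)
--         if hi - lo <= 1:
--             break
--         g = min(cnt[hi], cnt[lo], remaining)
--         cnt[hi] -= g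
--         if cnt[hi] == 0:
--             del cnt[hi]
--         cnt[hi - 1] = cnt.get(hi - 1, 0) + g
--         cnt[lo] -= g
--         if cnt[lo] == 0:
--             del cnt[lo]
--         cnt[lo + 1] = cnt.get(lo + 1, 0) + g
--         remaining -= g
--     return max(cnt) - min(cnt)
-- ===== Notes on version B (the rewrite author's own statement) =====
-- stated objective: faster
-- what changed: Replaces A's per-unit simulation (one dump per iteration, each rescanning the list for max/min/index) by a height counter whose rounds bulk-move whole top/bottom height groups at once.
import Mathlib
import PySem

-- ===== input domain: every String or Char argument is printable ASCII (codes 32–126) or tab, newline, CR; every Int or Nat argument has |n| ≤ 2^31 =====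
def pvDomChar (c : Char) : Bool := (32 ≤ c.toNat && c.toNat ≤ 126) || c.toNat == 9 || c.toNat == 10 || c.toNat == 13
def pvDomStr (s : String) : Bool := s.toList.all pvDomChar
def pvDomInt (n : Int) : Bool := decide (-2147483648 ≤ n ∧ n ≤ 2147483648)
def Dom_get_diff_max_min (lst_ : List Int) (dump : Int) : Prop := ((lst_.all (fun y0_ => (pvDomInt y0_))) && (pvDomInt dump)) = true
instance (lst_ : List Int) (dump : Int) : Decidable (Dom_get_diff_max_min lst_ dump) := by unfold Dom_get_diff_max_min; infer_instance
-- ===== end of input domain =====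

-- B replaces A's per-unit simulation (one dump, with fresh max/min scans, per iteration) by a
-- height counter whose rounds bulk-move whole top/bottom height groups; same return value.
-- NOTE: A mutates lst_ in place (levels it); B does not — the equivalence proved here is about
-- the RETURN value only.

-- ===== PORT A =====
-- the for-loop body; the `0` case is the for-else branch `ans = max(lst_) - min(lst_)`
def pvAGo (l : List Int) : Nat → Int
  | 0 => (PySem.List.max? l (fun x => x)).getD 0 - (PySem.List.min? l (fun x => x)).getD 0
  | n + 1 =>
    let mx := (PySem.List.max? l (fun x => x)).getD 0
    let mn := (PySem.List.min? l (fun x => x)).getD 0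
    let mi := (PySem.List.index? l mx).getD 0
    let ni := (PySem.List.index? l mn).getD 0
    let ans := (PySem.List.pyGet? l (mi : Int)).getD 0 - (PySem.List.pyGet? l (ni : Int)).getD 0
    if ans ≤ 1 then ans
    else
      let l1 := l.set mi ((PySem.List.pyGet? l (mi : Int)).getD 0 - 1)
      let l2 := l1.set ni ((PySem.List.pyGet? l1 (ni : Int)).getD 0 + 1)
      pvAGo l2 n

def get_diff_max_min (lst_ : List Int) (dump : Int) : Int := pvAGo lst_ dump.toNat

-- ===== PORT B =====
-- max(cnt) - min(cnt)  (max/min of a Python dict iterate its keys)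
def pvBFinal (cnt : PySem.Dict Int Int) : Int :=
  (PySem.List.max? cnt.keys (fun x => x)).getD 0 - (PySem.List.min? cnt.keys (fun x => x)).getD 0

-- the while-loop; fuel only makes the recursion structural (each real round uses g ≥ 1 dumps,
-- so fuel = dump.toNat is never exhausted)
def pvBGo : Nat → PySem.Dict Int Int → Int → Int
  | 0, cnt, _ => pvBFinal cnt
  | fuel + 1, cnt, remaining =>
    if remaining > 0 then
      let hi := (PySem.List.max? cnt.keys (fun x => x)).getD 0
      let lo := (PySem.List.min? cnt.keys (fun x => x)).getD 0
      if hi - lo ≤ 1 then pvBFinal cnt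
      else
        let g := min (min (cnt.getD hi 0) (cnt.getD lo 0)) remaining
        let c1 := cnt.insert hi (cnt.getD hi 0 - g)
        let c2 := if c1.getD hi 0 = 0 then c1.erase hi else c1
        let c3 := c2.insert (hi - 1) (c2.getD (hi - 1) 0 + g)
        let c4 := c3.insert lo (c3.getD lo 0 - g)
        let c5 := if c4.getD lo 0 = 0 then c4.erase lo else c4
        let c6 := c5.insert (lo + 1) (c5.getD (lo + 1) 0 + g)
        pvBGo fuel c6 (remaining - g)
    else pvBFinal cnt

def get_diff_max_min_alt (lst_ : List Int) (dump : Int) : Int :=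
  pvBGo dump.toNat (lst_.foldl (fun d h => d.insert h (d.getD h 0 + 1)) PySem.Dict.empty) dump

-- ===== PRECONDITION & SPEC =====
-- Pre_ excludes only the empty list, on which A raises ValueError (max() of an empty sequence).
def Pre_get_diff_max_min (lst_ : List Int) (dump : Int) : Prop := lst_ ≠ []
instance (lst_ : List Int) (dump : Int) : Decidable (Pre_get_diff_max_min lst_ dump) := by unfold Pre_get_diff_max_min; infer_instance
def pvWitness_get_diff_max_min : List Int × Int := ([2, 5, 1], 3)

def Spec_get_diff_max_min (lst_ : List Int) (dump : Int) (out : Int) : Prop := out = get_diff_max_min_alt lst_ dump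
instance (lst_ : List Int) (dump : Int) (out : Int) : Decidable (Spec_get_diff_max_min lst_ dump out) := by unfold Spec_get_diff_max_min; infer_instance

-- ===== CLAIM (what is proved, stated in full; the proofs are below) =====
def Claim_equal_get_diff_max_min : Prop := ∀ (lst_ : List Int) (dump : Int), Dom_get_diff_max_min lst_ dump → Pre_get_diff_max_min lst_ dump → Spec_get_diff_max_min lst_ dump (get_diff_max_min lst_ dump)

-- ===== LEMMAS AND PROOFS =====
-- Reference layer: both loops are proved equal to a per-unit step on the MULTISET of heights.
def pvMx (m : Multiset Int) : Int := WithBot.unbotD 0 ((m.map WithBot.some).sup)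
def pvMn (m : Multiset Int) : Int := WithTop.untopD 0 ((m.map WithTop.some).inf)

def pvStep (m : Multiset Int) : Multiset Int :=
  (pvMn m + 1) ::ₘ (pvMx m - 1) ::ₘ (m.erase (pvMx m)).erase (pvMn m)

def pvLoop : Multiset Int → Nat → Int
  | m, 0 => pvMx m - pvMn m
  | m, n + 1 => if pvMx m - pvMn m ≤ 1 then pvMx m - pvMn m else pvLoop (pvStep m) n

theorem pvMx_spec (m : Multiset Int) (hm : m ≠ 0) : pvMx m ∈ m ∧ ∀ b ∈ m, b ≤ pvMx m := by
  suffices h : ∃ a : Int, (m.map WithBot.some).sup = WithBot.some a ∧ a ∈ m ∧ ∀ b ∈ m, b ≤ a by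
    obtain ⟨a, hs, hmem, hb⟩ := h
    have : pvMx m = a := by simp [pvMx, hs]
    rw [this]; exact ⟨hmem, hb⟩
  induction m using Multiset.induction_on with
  | empty => simp at hm
  | cons a s ih =>
    by_cases hs : s = 0
    · subst hs; exact ⟨a, by simp, by simp, by simp⟩
    · obtain ⟨c, hc, hmem, hb⟩ := ih hs
      refine ⟨max a c, ?_, ?_, ?_⟩
      · simp [Multiset.sup_cons, hc]
      · rcases le_total a c with h | h
        · simp [max_eq_right h]; right; exact hmem
        · simp [max_eq_left h]
      · intro b hb'
        rcases Multiset.mem_cons.mp hb' with h | h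
        · subst h; exact le_max_left _ _
        · exact le_trans (hb b h) (le_max_right _ _)

theorem pvMn_spec (m : Multiset Int) (hm : m ≠ 0) : pvMn m ∈ m ∧ ∀ b ∈ m, pvMn m ≤ b := by
  suffices h : ∃ a : Int, (m.map WithTop.some).inf = WithTop.some a ∧ a ∈ m ∧ ∀ b ∈ m, a ≤ b by
    obtain ⟨a, hs, hmem, hb⟩ := h
    have : pvMn m = a := by simp [pvMn, hs]
    rw [this]; exact ⟨hmem, hb⟩
  induction m using Multiset.induction_on with
  | empty => simp at hm
  | cons a s ih =>
    by_cases hs : s = 0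
    · subst hs; exact ⟨a, by simp, by simp, by simp⟩
    · obtain ⟨c, hc, hmem, hb⟩ := ih hs
      refine ⟨min a c, ?_, ?_, ?_⟩
      · simp [Multiset.inf_cons, hc]
      · rcases le_total a c with h | h
        · simp [min_eq_left h]
        · simp [min_eq_right h]; right; exact hmem
      · intro b hb'
        rcases Multiset.mem_cons.mp hb' with h | h
        · subst h; exact min_le_left _ _
        · exact le_trans (min_le_right _ _) (hb b h)

theorem pvMx_unique (m : Multiset Int) (x : Int) (hx : x ∈ m) (hb : ∀ b ∈ m, b ≤ x) : pvMx m = x := by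
  have hm : m ≠ 0 := by rintro rfl; simp at hx
  obtain ⟨h1, h2⟩ := pvMx_spec m hm
  exact le_antisymm (hb _ h1) (h2 _ hx)

theorem pvMn_unique (m : Multiset Int) (x : Int) (hx : x ∈ m) (hb : ∀ b ∈ m, x ≤ b) : pvMn m = x := by
  have hm : m ≠ 0 := by rintro rfl; simp at hx
  obtain ⟨h1, h2⟩ := pvMn_spec m hm
  exact le_antisymm (h2 _ hx) (hb _ h1)
theorem multiset_set (l : List Int) (i : Nat) (v : Int) (h : i < l.length) :
    (↑(l.set i v) : Multiset Int) = v ::ₘ (↑l : Multiset Int).erase l[i] := by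
  induction l generalizing i with
  | nil => simp at h
  | cons a t ih =>
    cases i with
    | zero => simp [List.set]
    | succ i =>
      have hi : i < t.length := by simpa using h
      rw [List.set_cons_succ]
      have hcons : (↑(a :: t.set i v) : Multiset Int) = a ::ₘ ↑(t.set i v) := by simp
      have hcons2 : (↑(a :: t) : Multiset Int) = a ::ₘ ↑t := by simp
      rw [hcons, ih i hi, Multiset.cons_swap]
      simp only [List.getElem_cons_succ, hcons2]
      by_cases ha : a = t[i]
      · subst ha
        rw [Multiset.erase_cons_head]
        rw [Multiset.cons_erase (by exact_mod_cast List.getElem_mem hi)]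
      · rw [Multiset.erase_cons_tail _ ha]

theorem listMax_eq (l : List Int) (h : l ≠ []) :
    PySem.List.max? l (fun x => x) = some (pvMx (↑l : Multiset Int)) := by
  obtain ⟨v, hv⟩ : ∃ v, PySem.List.max? l (fun x => x) = some v := by
    rcases hmax : PySem.List.max? l (fun x => x) with _ | v
    · exact absurd ((PySem.List.max?_eq_none_iff l _).mp hmax) h
    · exact ⟨v, rfl⟩
  rw [hv]
  congr 1
  refine (pvMx_unique _ _ ?_ ?_).symm
  · simpa using PySem.List.max?_mem hv
  · intro b hb
    exact PySem.List.max?_isMax hv b (by simpa using hb)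

theorem listMin_eq (l : List Int) (h : l ≠ []) :
    PySem.List.min? l (fun x => x) = some (pvMn (↑l : Multiset Int)) := by
  obtain ⟨v, hv⟩ : ∃ v, PySem.List.min? l (fun x => x) = some v := by
    rcases hmin : PySem.List.min? l (fun x => x) with _ | v
    · exact absurd ((PySem.List.min?_eq_none_iff l _).mp hmin) h
    · exact ⟨v, rfl⟩
  rw [hv]
  congr 1
  refine (pvMn_unique _ _ ?_ ?_).symm
  · simpa using PySem.List.min?_mem hv
  · intro b hb
    exact PySem.List.min?_isMin hv b (by simpa using hb)

theorem aGo_eq : ∀ (n : Nat) (l : List Int), l ≠ [] → pvAGo l n = pvLoop (↑l : Multiset Int) n := by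
  intro n
  induction n with
  | zero =>
    intro l hl
    simp [pvAGo, pvLoop, listMax_eq l hl, listMin_eq l hl]
  | succ n ih =>
    intro l hl
    have hm : (↑l : Multiset Int) ≠ 0 := by simpa using hl
    obtain ⟨hmxmem, hmxb⟩ := pvMx_spec _ hm
    obtain ⟨hmnmem, hmnb⟩ := pvMn_spec _ hm
    set mx := pvMx (↑l : Multiset Int) with hmx
    set mn := pvMn (↑l : Multiset Int) with hmn
    have hmxl : mx ∈ l := by simpa using hmxmem
    have hmnl : mn ∈ l := by simpa using hmnmem
    obtain ⟨mi, hmi⟩ : ∃ mi, PySem.List.index? l mx = some mi := by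
      rcases hx : PySem.List.index? l mx with _ | mi
      · have := (PySem.List.index?_eq_none_iff l mx).mp hx; exact absurd hmxl this
      · exact ⟨mi, rfl⟩
    obtain ⟨ni, hni⟩ : ∃ ni, PySem.List.index? l mn = some ni := by
      rcases hx : PySem.List.index? l mn with _ | ni
      · have := (PySem.List.index?_eq_none_iff l mn).mp hx; exact absurd hmnl this
      · exact ⟨ni, rfl⟩
    obtain ⟨hmilt, hmiv, -⟩ := PySem.List.getElem_of_index?_eq_some hmi
    obtain ⟨hnilt, hniv, -⟩ := PySem.List.getElem_of_index?_eq_some hni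
    have hgetmi : PySem.List.pyGet? l (mi : Int) = some mx := by
      rw [PySem.List.pyGet?_natCast]; simp [List.getElem?_eq_getElem hmilt, hmiv]
    have hgetni : PySem.List.pyGet? l (ni : Int) = some mn := by
      rw [PySem.List.pyGet?_natCast]; simp [List.getElem?_eq_getElem hnilt, hniv]
    rw [pvAGo]
    simp only [listMax_eq l hl, listMin_eq l hl, hmi, hni, Option.getD_some, ← hmx, ← hmn,
      hgetmi, hgetni]
    by_cases hb : mx - mn ≤ 1
    · rw [pvLoop, ← hmx, ← hmn]; simp only [if_pos hb]
    · have h2 : 2 ≤ mx - mn := by omega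
      have hne : mi ≠ ni := by
        intro hcontra; subst hcontra; rw [hmiv] at hniv; omega
      simp only [if_neg hb]
      set l1 := l.set mi (mx - 1) with hl1
      have hl1len : l1.length = l.length := by simp [hl1]
      have hnilt1 : ni < l1.length := by omega
      have hq : l1[ni]? = some mn := by
        rw [hl1, List.getElem?_set_ne hne, List.getElem?_eq_getElem hnilt, hniv]
      have hl1ni : l1[ni]'hnilt1 = mn := by
        have hgg := List.getElem?_eq_getElem hnilt1
        rw [hq] at hgg
        exact (Option.some.inj hgg).symm
      have hget1 : PySem.List.pyGet? l1 (ni : Int) = some mn := by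
        rw [PySem.List.pyGet?_natCast]
        rw [List.getElem?_eq_getElem hnilt1, hl1ni]
      rw [hget1]
      simp only [Option.getD_some]
      set l2 := l1.set ni (mn + 1) with hl2
      have hm1 : (↑l1 : Multiset Int) = (mx - 1) ::ₘ (↑l : Multiset Int).erase mx := by
        rw [hl1, multiset_set l mi (mx - 1) hmilt, hmiv]
      have hm2 : (↑l2 : Multiset Int) = pvStep (↑l : Multiset Int) := by
        rw [hl2, multiset_set l1 ni (mn + 1) hnilt1, hl1ni, hm1,
          Multiset.erase_cons_tail _ (by omega : mx - 1 ≠ mn)]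
        rfl
      have hl2ne : l2 ≠ [] := by
        have hlen2 : l2.length = l.length := by simp [hl2, hl1]
        intro hcontra; rw [hcontra] at hlen2; simp at hlen2
        exact hl (List.length_eq_zero_iff.mp hlen2.symm)
      rw [ih l2 hl2ne, hm2, pvLoop, if_neg hb]
theorem get?_erase_pv (d : PySem.Dict Int Int) (k k' : Int) :
    (d.erase k).get? k' = if k' = k then none else d.get? k' := by
  obtain ⟨items⟩ := d
  simp only [PySem.Dict.erase, PySem.Dict.get?]
  induction items with
  | nil => simp
  | cons p rest ih =>
    rw [List.filter_cons]
    by_cases hp : p.1 = k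
    · rw [if_neg (by simp [hp])]
      rw [ih]
      by_cases hk : k' = k
      · simp [hk]
      · rw [if_neg hk, if_neg hk,
          List.find?_cons_of_neg (by simp [hp]; exact fun h => hk h.symm)]
    · rw [if_pos (by simp [hp])]
      by_cases hpk : p.1 = k'
      · have hk : ¬ k' = k := fun h => hp (hpk.trans h)
        rw [List.find?_cons_of_pos (by simp [hpk]),
          List.find?_cons_of_pos (by simp [hpk]), if_neg hk]
      · rw [List.find?_cons_of_neg (by simp [hpk]),
          List.find?_cons_of_neg (by simp [hpk]), ih]

theorem getD_erase_pv (d : PySem.Dict Int Int) (k k' v : Int) :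
    (d.erase k).getD k' v = if k' = k then v else d.getD k' v := by
  simp only [PySem.Dict.getD, get?_erase_pv]
  by_cases h : k' = k <;> simp [h]

theorem keys_erase_pv (d : PySem.Dict Int Int) (k : Int) :
    (d.erase k).keys = d.keys.filter (fun x => !(x == k)) := by
  obtain ⟨items⟩ := d
  simp only [PySem.Dict.erase, PySem.Dict.keys]
  rw [List.filter_map]
  rfl

theorem mem_keys_erase_pv (d : PySem.Dict Int Int) (k k' : Int) :
    k' ∈ (d.erase k).keys ↔ k' ∈ d.keys ∧ k' ≠ k := by
  rw [keys_erase_pv]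
  simp [List.mem_filter]

theorem nodup_keys_erase_pv (d : PySem.Dict Int Int) (k : Int) (h : d.keys.Nodup) :
    (d.erase k).keys.Nodup := by
  rw [keys_erase_pv]
  exact h.filter _

def pvRel (d : PySem.Dict Int Int) (m : Multiset Int) : Prop :=
  d.keys.Nodup ∧ (∀ k, d.getD k 0 = (m.count k : Int)) ∧ (∀ k, k ∈ d.keys ↔ k ∈ m)

theorem rel_counter (l : List Int) : pvRel (PySem.Dict.counter l) (↑l : Multiset Int) := by
  refine ⟨PySem.Dict.nodup_keys_counter l, ?_, ?_⟩
  · intro k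
    rw [PySem.Dict.getD_counter, Multiset.coe_count]
  · intro k
    rw [PySem.Dict.keys_counter, PySem.Set.mem_ofList]
    simp

theorem dictMax_eq (d : PySem.Dict Int Int) (m : Multiset Int) (hrel : pvRel d m) (hm : m ≠ 0) :
    PySem.List.max? d.keys (fun x => x) = some (pvMx m) := by
  obtain ⟨-, -, hmem⟩ := hrel
  obtain ⟨hx, hb⟩ := pvMx_spec m hm
  obtain ⟨v, hv⟩ : ∃ v, PySem.List.max? d.keys (fun x => x) = some v := by
    rcases hq : PySem.List.max? d.keys (fun x => x) with _ | v
    · rw [PySem.List.max?_eq_none_iff] at hq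
      have : pvMx m ∈ d.keys := (hmem _).mpr hx
      rw [hq] at this; simp at this
    · exact ⟨v, rfl⟩
  rw [hv]
  have hvm : v ∈ m := (hmem v).mp (PySem.List.max?_mem hv)
  have hle : pvMx m ≤ v := PySem.List.max?_isMax hv _ ((hmem _).mpr hx)
  exact congrArg some (le_antisymm (hb v hvm) hle)

theorem dictMin_eq (d : PySem.Dict Int Int) (m : Multiset Int) (hrel : pvRel d m) (hm : m ≠ 0) :
    PySem.List.min? d.keys (fun x => x) = some (pvMn m) := by
  obtain ⟨-, -, hmem⟩ := hrel
  obtain ⟨hx, hb⟩ := pvMn_spec m hm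
  obtain ⟨v, hv⟩ : ∃ v, PySem.List.min? d.keys (fun x => x) = some v := by
    rcases hq : PySem.List.min? d.keys (fun x => x) with _ | v
    · rw [PySem.List.min?_eq_none_iff] at hq
      have : pvMn m ∈ d.keys := (hmem _).mpr hx
      rw [hq] at this; simp at this
    · exact ⟨v, rfl⟩
  rw [hv]
  have hvm : v ∈ m := (hmem v).mp (PySem.List.min?_mem hv)
  have hle : v ≤ pvMn m := PySem.List.min?_isMin hv _ ((hmem _).mpr hx)
  exact congrArg some (le_antisymm hle (hb v hvm))

theorem bfinal_eq (d : PySem.Dict Int Int) (m : Multiset Int) (hrel : pvRel d m) (hm : m ≠ 0) :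
    pvBFinal d = pvMx m - pvMn m := by
  rw [pvBFinal, dictMax_eq d m hrel hm, dictMin_eq d m hrel hm]
  rfl

theorem count_erase_int (s : Multiset Int) (a : Int) (ha : a ∈ s) (k : Int) :
    ((s.erase a).count k : Int) = s.count k - (if k = a then 1 else 0) := by
  by_cases h : k = a
  · subst h
    rw [Multiset.count_erase_self, Nat.cast_sub (Multiset.count_pos.mpr ha)]
    simp
  · rw [Multiset.count_erase_of_ne h]
    simp [h]

theorem count_step (m : Multiset Int) (hm : m ≠ 0) (h2 : 2 ≤ pvMx m - pvMn m) (k : Int) :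
    ((pvStep m).count k : Int) = m.count k
      + (if k = pvMx m - 1 then 1 else 0) + (if k = pvMn m + 1 then 1 else 0)
      - (if k = pvMx m then 1 else 0) - (if k = pvMn m then 1 else 0) := by
  obtain ⟨hxm, hxb⟩ := pvMx_spec m hm
  obtain ⟨hnm, hnb⟩ := pvMn_spec m hm
  have hne : pvMn m ≠ pvMx m := by omega
  have hnm' : pvMn m ∈ m.erase (pvMx m) := by
    rw [← Multiset.count_pos, Multiset.count_erase_of_ne hne]
    exact Multiset.count_pos.mpr hnm
  rw [pvStep, Multiset.count_cons, Multiset.count_cons]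
  push_cast
  rw [count_erase_int _ _ hnm', count_erase_int _ _ hxm]
  split_ifs <;> omega

theorem step_ne_zero (m : Multiset Int) : pvStep m ≠ 0 := by
  rw [pvStep]; exact Multiset.cons_ne_zero

theorem mem_step_le (m : Multiset Int) (hm : m ≠ 0) (h2 : 2 ≤ pvMx m - pvMn m)
    (b : Int) (hb : b ∈ pvStep m) : b ≤ pvMx m ∧ pvMn m ≤ b := by
  obtain ⟨hxm, hxb⟩ := pvMx_spec m hm
  obtain ⟨hnm, hnb⟩ := pvMn_spec m hm
  rw [pvStep] at hb
  rcases Multiset.mem_cons.mp hb with h | h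
  · omega
  · rcases Multiset.mem_cons.mp h with h' | h'
    · have := hnb _ hxm; omega
    · have hbm : b ∈ m := Multiset.mem_of_mem_erase (Multiset.mem_of_mem_erase h')
      exact ⟨hxb _ hbm, hnb _ hbm⟩

theorem step_max (m : Multiset Int) (hm : m ≠ 0) (h2 : 2 ≤ pvMx m - pvMn m)
    (hc : 2 ≤ (m.count (pvMx m) : Int)) : pvMx (pvStep m) = pvMx m := by
  refine pvMx_unique _ _ ?_ (fun b hb => (mem_step_le m hm h2 b hb).1)
  rw [← Multiset.count_pos]
  have := count_step m hm h2 (pvMx m)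
  simp only [if_pos rfl, if_neg (by omega : pvMx m ≠ pvMx m - 1),
    if_neg (by omega : pvMx m ≠ pvMn m + 1), if_neg (by omega : pvMx m ≠ pvMn m)] at this
  omega

theorem step_min (m : Multiset Int) (hm : m ≠ 0) (h2 : 2 ≤ pvMx m - pvMn m)
    (hc : 2 ≤ (m.count (pvMn m) : Int)) : pvMn (pvStep m) = pvMn m := by
  refine pvMn_unique _ _ ?_ (fun b hb => (mem_step_le m hm h2 b hb).2)
  rw [← Multiset.count_pos]
  have := count_step m hm h2 (pvMn m)
  simp only [if_pos rfl, if_neg (by omega : pvMn m ≠ pvMx m - 1),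
    if_neg (by omega : pvMn m ≠ pvMn m + 1), if_neg (by omega : pvMn m ≠ pvMx m)] at this
  omega

theorem count_iter (g : Nat) : ∀ (m : Multiset Int), m ≠ 0 → 2 ≤ pvMx m - pvMn m →
    (g : Int) ≤ m.count (pvMx m) → (g : Int) ≤ m.count (pvMn m) → ∀ k : Int,
    ((pvStep^[g] m).count k : Int) = m.count k
      + g * (if k = pvMx m - 1 then 1 else 0) + g * (if k = pvMn m + 1 then 1 else 0)
      - g * (if k = pvMx m then 1 else 0) - g * (if k = pvMn m then 1 else 0) := by
  induction g with
  | zero => intro m _ _ _ _ k; simp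
  | succ g ih =>
    intro m hm h2 hgx hgn k
    rw [Function.iterate_succ_apply]
    have hstep := count_step m hm h2
    rcases Nat.eq_zero_or_pos g with hg0 | hgpos
    · subst hg0
      simp only [Function.iterate_zero, id_eq]
      have := hstep k
      push_cast
      omega
    · have hcx2 : 2 ≤ (m.count (pvMx m) : Int) := by push_cast at hgx ⊢; omega
      have hcn2 : 2 ≤ (m.count (pvMn m) : Int) := by push_cast at hgn ⊢; omega
      have hmx' := step_max m hm h2 hcx2
      have hmn' := step_min m hm h2 hcn2
      have hm' : pvStep m ≠ 0 := step_ne_zero m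
      have h2' : 2 ≤ pvMx (pvStep m) - pvMn (pvStep m) := by rw [hmx', hmn']; exact h2
      have hcx' : (g : Int) ≤ (pvStep m).count (pvMx (pvStep m)) := by
        rw [hmx']
        have := hstep (pvMx m)
        simp only [if_pos rfl, if_neg (by omega : pvMx m ≠ pvMx m - 1),
          if_neg (by omega : pvMx m ≠ pvMn m + 1), if_neg (by omega : pvMx m ≠ pvMn m)] at this
        push_cast at hgx ⊢
        omega
      have hcn' : (g : Int) ≤ (pvStep m).count (pvMn (pvStep m)) := by
        rw [hmn']
        have := hstep (pvMn m)
        simp only [if_pos rfl, if_neg (by omega : pvMn m ≠ pvMx m - 1),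
          if_neg (by omega : pvMn m ≠ pvMn m + 1), if_neg (by omega : pvMn m ≠ pvMx m)] at this
        push_cast at hgn ⊢
        omega
      have hrec := ih (pvStep m) hm' h2' hcx' hcn' k
      rw [hmx', hmn'] at hrec
      have := hstep k
      push_cast at hrec ⊢
      split_ifs at hrec this ⊢ <;> omega

theorem loop_bulk (g : Nat) : ∀ (m : Multiset Int) (n : Nat), m ≠ 0 → 2 ≤ pvMx m - pvMn m →
    (g : Int) ≤ m.count (pvMx m) → (g : Int) ≤ m.count (pvMn m) → g ≤ n →
    pvLoop m n = pvLoop (pvStep^[g] m) (n - g) := by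
  induction g with
  | zero => intro m n _ _ _ _ _; simp
  | succ g ih =>
    intro m n hm h2 hgx hgn hgl
    obtain ⟨n', rfl⟩ : ∃ n', n = n' + 1 := ⟨n - 1, by omega⟩
    rw [pvLoop, if_neg (by omega)]
    rw [Function.iterate_succ_apply]
    rcases Nat.eq_zero_or_pos g with hg0 | hgpos
    · subst hg0
      simp
    · have hcx2 : 2 ≤ (m.count (pvMx m) : Int) := by push_cast at hgx; omega
      have hcn2 : 2 ≤ (m.count (pvMn m) : Int) := by push_cast at hgn; omega
      have hmx' := step_max m hm h2 hcx2
      have hmn' := step_min m hm h2 hcn2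
      have h2' : 2 ≤ pvMx (pvStep m) - pvMn (pvStep m) := by rw [hmx', hmn']; exact h2
      have hstep := count_step m hm h2
      have hcx' : (g : Int) ≤ (pvStep m).count (pvMx (pvStep m)) := by
        rw [hmx']
        have := hstep (pvMx m)
        simp only [if_neg (by omega : pvMx m ≠ pvMx m - 1),
          if_neg (by omega : pvMx m ≠ pvMn m + 1), if_neg (by omega : pvMx m ≠ pvMn m)] at this
        push_cast at hgx ⊢
        omega
      have hcn' : (g : Int) ≤ (pvStep m).count (pvMn (pvStep m)) := by
        rw [hmn']
        have := hstep (pvMn m)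
        simp only [if_neg (by omega : pvMn m ≠ pvMx m - 1),
          if_neg (by omega : pvMn m ≠ pvMn m + 1), if_neg (by omega : pvMn m ≠ pvMx m)] at this
        push_cast at hgn ⊢
        omega
      have := ih (pvStep m) n' (step_ne_zero m) h2' hcx' hcn' (by omega)
      rw [this]
      congr 1
      omega

set_option maxHeartbeats 1600000 in
theorem rel_update (d : PySem.Dict Int Int) (m : Multiset Int) (hrel : pvRel d m) (hm : m ≠ 0)
    (h2 : 2 ≤ pvMx m - pvMn m) (g : Int) (hg1 : 1 ≤ g)
    (hgx : g ≤ (m.count (pvMx m) : Int)) (hgn : g ≤ (m.count (pvMn m) : Int)) :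
    pvRel
      ((let c1 := d.insert (pvMx m) (d.getD (pvMx m) 0 - g);
        let c2 := if c1.getD (pvMx m) 0 = 0 then c1.erase (pvMx m) else c1;
        let c3 := c2.insert (pvMx m - 1) (c2.getD (pvMx m - 1) 0 + g);
        let c4 := c3.insert (pvMn m) (c3.getD (pvMn m) 0 - g);
        let c5 := if c4.getD (pvMn m) 0 = 0 then c4.erase (pvMn m) else c4;
        c5.insert (pvMn m + 1) (c5.getD (pvMn m + 1) 0 + g)))
      (pvStep^[g.toNat] m) := by
  obtain ⟨hnd, hcount, hmem⟩ := hrel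
  set c1 := d.insert (pvMx m) (d.getD (pvMx m) 0 - g) with hc1
  set c2 := if c1.getD (pvMx m) 0 = 0 then c1.erase (pvMx m) else c1 with hc2
  set c3 := c2.insert ((pvMx m) - 1) (c2.getD ((pvMx m) - 1) 0 + g) with hc3
  set c4 := c3.insert (pvMn m) (c3.getD (pvMn m) 0 - g) with hc4
  set c5 := if c4.getD (pvMn m) 0 = 0 then c4.erase (pvMn m) else c4 with hc5
  set c6 := c5.insert ((pvMn m) + 1) (c5.getD ((pvMn m) + 1) 0 + g) with hc6
  -- pointwise value description of the chain
  have hc1D : ∀ k, c1.getD k 0 = if k = (pvMx m) then (m.count (pvMx m) : Int) - g else (m.count k : Int) := by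
    intro k
    rw [hc1, PySem.Dict.getD_insert]
    by_cases h : k = (pvMx m) <;> simp [h, hcount]
  have hc2D : ∀ k, c2.getD k 0 = if k = (pvMx m) then (m.count (pvMx m) : Int) - g else (m.count k : Int) := by
    intro k
    rw [hc2]
    by_cases he : c1.getD (pvMx m) 0 = 0
    · rw [if_pos he, getD_erase_pv]
      by_cases h : k = (pvMx m)
      · rw [if_pos h, if_pos h]
        have := hc1D (pvMx m)
        simp at this
        omega
      · rw [if_neg h, if_neg h, hc1D, if_neg h]
    · rw [if_neg he, hc1D]
  have hc2mem : ∀ k, k ∈ c2.keys ↔ (if k = (pvMx m) then (m.count (pvMx m) : Int) - g ≠ 0 else k ∈ m) := by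
    intro k
    have hc1v : c1.getD (pvMx m) 0 = (m.count (pvMx m) : Int) - g := by simp [hc1D]
    rw [hc2]
    by_cases he : c1.getD (pvMx m) 0 = 0
    · rw [if_pos he, mem_keys_erase_pv, hc1, PySem.Dict.mem_keys_insert]
      rw [hc1v] at he
      by_cases h : k = (pvMx m) <;> simp [h, he, hmem]
    · rw [if_neg he, hc1, PySem.Dict.mem_keys_insert]
      rw [hc1v] at he
      by_cases h : k = (pvMx m) <;> simp [h, he, hmem]
  have hxm : (pvMx m) ∈ m := (pvMx_spec m hm).1
  have hnm : (pvMn m) ∈ m := (pvMn_spec m hm).1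
  have hne1 : (pvMx m) - 1 ≠ (pvMx m) := by omega
  have hlone : (pvMn m) ≠ (pvMx m) - 1 := by omega
  have hlone2 : (pvMn m) ≠ (pvMx m) := by omega
  have hlo1ne : (pvMn m) + 1 ≠ (pvMn m) := by omega
  have hlo1hi : (pvMn m) + 1 ≠ (pvMx m) := by omega
  have hc3D : ∀ k, c3.getD k 0 =
      if k = (pvMx m) - 1 then (m.count ((pvMx m) - 1) : Int) + g
      else if k = (pvMx m) then (m.count (pvMx m) : Int) - g else (m.count k : Int) := by
    intro k
    rw [hc3, PySem.Dict.getD_insert]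
    by_cases h : k = (pvMx m) - 1
    · rw [if_pos h, if_pos h, hc2D, if_neg hne1]
    · rw [if_neg h, if_neg h, hc2D]
  have hc3mem : ∀ k, k ∈ c3.keys ↔ k = (pvMx m) - 1 ∨ (if k = (pvMx m) then (m.count (pvMx m) : Int) - g ≠ 0 else k ∈ m) := by
    intro k
    rw [hc3, PySem.Dict.mem_keys_insert, hc2mem]
  have hc4v : c4.getD (pvMn m) 0 = (m.count (pvMn m) : Int) - g := by
    rw [hc4, PySem.Dict.getD_insert, if_pos rfl, hc3D, if_neg hlone, if_neg hlone2]
  have hc5D : ∀ k, c5.getD k 0 =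
      if k = (pvMn m) then (m.count (pvMn m) : Int) - g
      else if k = (pvMx m) - 1 then (m.count ((pvMx m) - 1) : Int) + g
      else if k = (pvMx m) then (m.count (pvMx m) : Int) - g else (m.count k : Int) := by
    intro k
    have hc4D : ∀ k', c4.getD k' 0 = if k' = (pvMn m) then (m.count (pvMn m) : Int) - g
        else c3.getD k' 0 := by
      intro k'; rw [hc4, PySem.Dict.getD_insert]
      by_cases h : k' = (pvMn m)
      · rw [if_pos h, if_pos h, hc3D, if_neg hlone, if_neg hlone2]
      · rw [if_neg h, if_neg h]
    rw [hc5]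
    by_cases he : c4.getD (pvMn m) 0 = 0
    · rw [if_pos he, getD_erase_pv]
      rw [hc4v] at he
      by_cases h : k = (pvMn m)
      · rw [if_pos h, if_pos h]; omega
      · rw [if_neg h, if_neg h, hc4D, if_neg h, hc3D]
    · rw [if_neg he, hc4D, hc3D]
  have hc5mem : ∀ k, k ∈ c5.keys ↔
      (if k = (pvMn m) then (m.count (pvMn m) : Int) - g ≠ 0
       else k = (pvMx m) - 1 ∨ (if k = (pvMx m) then (m.count (pvMx m) : Int) - g ≠ 0 else k ∈ m)) := by
    intro k
    rw [hc5]
    by_cases he : c4.getD (pvMn m) 0 = 0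
    · rw [if_pos he, mem_keys_erase_pv, hc4, PySem.Dict.mem_keys_insert, hc3mem]
      rw [hc4v] at he
      by_cases h : k = (pvMn m) <;> simp [h, he]
    · rw [if_neg he, hc4, PySem.Dict.mem_keys_insert, hc3mem]
      rw [hc4v] at he
      by_cases h : k = (pvMn m) <;> simp [h, he]
  have hc6D : ∀ k, c6.getD k 0 =
      if k = (pvMn m) + 1 then
        (if (pvMn m) + 1 = (pvMx m) - 1 then (m.count ((pvMx m) - 1) : Int) + g else (m.count ((pvMn m) + 1) : Int)) + g
      else if k = (pvMn m) then (m.count (pvMn m) : Int) - g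
      else if k = (pvMx m) - 1 then (m.count ((pvMx m) - 1) : Int) + g
      else if k = (pvMx m) then (m.count (pvMx m) : Int) - g else (m.count k : Int) := by
    intro k
    rw [hc6, PySem.Dict.getD_insert]
    by_cases h : k = (pvMn m) + 1
    · rw [if_pos h, if_pos h, hc5D, if_neg hlo1ne]
      by_cases h' : (pvMn m) + 1 = (pvMx m) - 1
      · rw [if_pos h', if_pos h']
      · rw [if_neg h', if_neg h', if_neg hlo1hi]
    · rw [if_neg h, if_neg h, hc5D]
  have hc6mem : ∀ k, k ∈ c6.keys ↔ k = (pvMn m) + 1 ∨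
      (if k = (pvMn m) then (m.count (pvMn m) : Int) - g ≠ 0
       else k = (pvMx m) - 1 ∨ (if k = (pvMx m) then (m.count (pvMx m) : Int) - g ≠ 0 else k ∈ m)) := by
    intro k
    rw [hc6, PySem.Dict.mem_keys_insert, hc5mem]
  -- counts of the bulk-stepped multiset
  have hgnat : ((g.toNat : Nat) : Int) = g := Int.toNat_of_nonneg (by omega)
  have hiter := count_iter g.toNat m hm h2 (by omega) (by omega)
  refine ⟨?_, ?_, ?_⟩
  · -- nodup
    rw [hc6]
    apply PySem.Dict.nodup_keys_insert
    rw [hc5]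
    split
    · apply nodup_keys_erase_pv
      rw [hc4]; apply PySem.Dict.nodup_keys_insert
      rw [hc3]; apply PySem.Dict.nodup_keys_insert
      rw [hc2]
      split
      · exact nodup_keys_erase_pv _ _ (by rw [hc1]; exact PySem.Dict.nodup_keys_insert _ _ _ hnd)
      · rw [hc1]; exact PySem.Dict.nodup_keys_insert _ _ _ hnd
    · rw [hc4]; apply PySem.Dict.nodup_keys_insert
      rw [hc3]; apply PySem.Dict.nodup_keys_insert
      rw [hc2]
      split
      · exact nodup_keys_erase_pv _ _ (by rw [hc1]; exact PySem.Dict.nodup_keys_insert _ _ _ hnd)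
      · rw [hc1]; exact PySem.Dict.nodup_keys_insert _ _ _ hnd
  · -- values = counts
    intro k
    rw [hc6D k, hiter k, hgnat]
    by_cases hmid : pvMn m + 1 = pvMx m - 1
    · rw [← hmid]
      split_ifs <;> subst_vars <;> omega
    · split_ifs <;> subst_vars <;> omega
  · -- keys = support
    intro k
    have hk := hiter k
    rw [hgnat] at hk
    have hmk : k ∈ m ↔ (1 : Int) ≤ (m.count k : Int) := by
      rw [← Multiset.count_pos]; omega
    rw [hc6mem k, hmk, ← Multiset.count_pos]
    by_cases hmid : pvMn m + 1 = pvMx m - 1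
    · rw [← hmid] at hk ⊢
      split_ifs at hk ⊢ <;> subst_vars <;> omega
    · split_ifs at hk ⊢ <;> subst_vars <;> omega

theorem iter_ne_zero (g : Nat) (m : Multiset Int) (hm : m ≠ 0) : pvStep^[g] m ≠ 0 := by
  cases g with
  | zero => simpa
  | succ g => rw [Function.iterate_succ_apply']; exact step_ne_zero _

theorem bGo_eq (fuel : Nat) : ∀ (d : PySem.Dict Int Int) (m : Multiset Int) (r : Int),
    pvRel d m → m ≠ 0 → r.toNat ≤ fuel → pvBGo fuel d r = pvLoop m r.toNat := by
  induction fuel with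
  | zero =>
    intro d m r hrel hm hf
    have h0 : r.toNat = 0 := by omega
    rw [pvBGo, h0, bfinal_eq d m hrel hm, pvLoop]
  | succ fuel ih =>
    intro d m r hrel hm hf
    rw [pvBGo]
    by_cases hr : r > 0
    · rw [if_pos hr]
      simp only [dictMax_eq d m hrel hm, dictMin_eq d m hrel hm, Option.getD_some]
      obtain ⟨k, hk⟩ : ∃ k, r.toNat = k + 1 := ⟨r.toNat - 1, by omega⟩
      by_cases hd : pvMx m - pvMn m ≤ 1
      · rw [if_pos hd, bfinal_eq d m hrel hm, hk, pvLoop, if_pos hd]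
      · rw [if_neg hd]
        have h2 : 2 ≤ pvMx m - pvMn m := by omega
        obtain ⟨hnd, hcount, hmem⟩ := hrel
        have hcx : (1 : Int) ≤ (m.count (pvMx m) : Int) := by
          exact_mod_cast Multiset.count_pos.mpr (pvMx_spec m hm).1
        have hcn : (1 : Int) ≤ (m.count (pvMn m) : Int) := by
          exact_mod_cast Multiset.count_pos.mpr (pvMn_spec m hm).1
        set g := min (min (d.getD (pvMx m) 0) (d.getD (pvMn m) 0)) r with hg
        have hgc : g = min (min ((m.count (pvMx m) : Int)) ((m.count (pvMn m) : Int))) r := by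
          rw [hg, hcount, hcount]
        have hg1 : 1 ≤ g := by rw [hgc]; omega
        have hgx : g ≤ (m.count (pvMx m) : Int) := by rw [hgc]; omega
        have hgn : g ≤ (m.count (pvMn m) : Int) := by rw [hgc]; omega
        have hgr : g ≤ r := by rw [hgc]; omega
        have hrel6 := rel_update d m ⟨hnd, hcount, hmem⟩ hm h2 g hg1 hgx hgn
        have hgnat : ((g.toNat : Nat) : Int) = g := Int.toNat_of_nonneg (by omega)
        have hiterne : pvStep^[g.toNat] m ≠ 0 := iter_ne_zero _ _ hm
        have hbulk := loop_bulk g.toNat m r.toNat hm h2 (by rw [hgnat]; exact hgx)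
          (by rw [hgnat]; exact hgn) (by omega)
        have hrg : (r - g).toNat = r.toNat - g.toNat := by omega
        rw [ih _ _ (r - g) hrel6 hiterne (by omega), hrg, ← hbulk]
    · rw [if_neg hr, bfinal_eq d m hrel hm]
      have h0 : r.toNat = 0 := by omega
      rw [h0, pvLoop]

theorem pv_main (lst_ : List Int) (dump : Int) (h : lst_ ≠ []) :
    get_diff_max_min lst_ dump = get_diff_max_min_alt lst_ dump := by
  rw [get_diff_max_min, get_diff_max_min_alt,
    PySem.Dict.foldl_insert_getD_add_one_eq_counter]
  rw [aGo_eq dump.toNat lst_ h,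
    bGo_eq dump.toNat (PySem.Dict.counter lst_) (↑lst_ : Multiset Int) dump
      (rel_counter lst_) (by simpa using h) (le_refl _)]

-- ===== VERDICT (by name: the statement is the Claim_ definition above) =====
theorem get_diff_max_min_spec : Claim_equal_get_diff_max_min := by
  intro lst_ dump _ hpre
  exact pv_main lst_ dump hpre
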